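-- pv_equiv track=rewrite | github.com/B-UMMI/Chewie-NS | app/api/extra_scripts/chewBBACA_PrepExternalSchema_optimization_tests.py | determine_duplicated_prots
-- ===== SOURCE A (Python) =====
-- def determine_duplicated_prots(proteins):
--     """ Creates a dictionary with protein sequences as keys and all sequence
--         identifiers associated with that protein as values.
--
--         Args:
--             proteins (dict): dictionary with protein sequence identifiers as
--             keys and protein sequences as values.
--
--         Returns:
--             equal_prots (dict): dictionary with protein sequence as keys and
--             sequence identifiers that are associated with each protein sequence
--             as values.
--     """
--
--     equal_prots = {}
--     for protid, protein in proteins.items():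
--         # if protein sequence was already added as key
--         if protein in equal_prots:
--             # append new protid
--             equal_prots[protein].append(protid)
--         # else add new protein sequence as key and protid
--         # as value
--         else:
--             equal_prots[protein] = [protid]
--
--     return equal_prots
-- ===== SOURCE B (Python) =====
-- def determine_duplicated_prots(proteins):
--     """Group sequence identifiers by protein sequence: one pass to list the
--     distinct proteins in first-occurrence order, then one comprehension per
--     distinct protein collecting its identifiers."""
--     distinct = list(dict.fromkeys(proteins.values()))
--     return {p: [protid for protid, q in proteins.items() if q == p]
--             for p in distinct}
-- ===== Notes on version B (the rewrite author's own statement) =====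
-- stated objective: alternative
-- what changed: Replaces the single-pass dict accumulation (membership test + in-place append per item) with a two-phase scheme: first an ordered dedup of the protein sequences, then a dict comprehension that rescans the items once per distinct protein.
import Mathlib
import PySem

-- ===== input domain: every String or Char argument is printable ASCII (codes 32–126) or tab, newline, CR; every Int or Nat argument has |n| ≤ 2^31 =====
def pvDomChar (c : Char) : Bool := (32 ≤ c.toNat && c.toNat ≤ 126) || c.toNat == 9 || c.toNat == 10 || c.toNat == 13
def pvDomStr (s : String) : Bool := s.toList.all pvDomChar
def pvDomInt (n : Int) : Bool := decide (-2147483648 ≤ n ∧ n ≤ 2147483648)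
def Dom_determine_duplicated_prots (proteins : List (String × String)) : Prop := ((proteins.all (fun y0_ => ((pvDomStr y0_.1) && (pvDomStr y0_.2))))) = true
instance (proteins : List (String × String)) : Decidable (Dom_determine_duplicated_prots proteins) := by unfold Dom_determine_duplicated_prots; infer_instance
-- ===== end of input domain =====

-- B replaces A's single-pass dict accumulation by an ordered dedup of the proteins
-- followed by one identifier-collecting scan per distinct protein (alternative decomposition).


-- ===== PORT A =====
def determine_duplicated_prots (proteins : List (String × String)) : List (String × List String) :=
  (proteins.foldl
    (fun d it =>
      if d.contains it.2 then d.modify it.2 ([] : List String) (fun ids => ids ++ [it.1])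
      else d.insert it.2 [it.1])
    (PySem.Dict.empty : PySem.Dict String (List String))).items

-- ===== PORT B =====
def determine_duplicated_prots_alt (proteins : List (String × String)) : List (String × List String) :=
  (PySem.List.dedup (proteins.map (fun it => it.2))).map
    (fun p => (p, (proteins.filter (fun it => it.2 == p)).map (fun it => it.1)))

-- ===== PRECONDITION & SPEC =====
def Spec_determine_duplicated_prots (proteins : List (String × String)) (out : List (String × List String)) : Prop := out = determine_duplicated_prots_alt proteins
instance (proteins : List (String × String)) (out : List (String × List String)) : Decidable (Spec_determine_duplicated_prots proteins out) := by unfold Spec_determine_duplicated_prots; infer_instance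

-- ===== CLAIM (what is proved, stated in full; the proofs are below) =====
def Claim_equal_determine_duplicated_prots : Prop := ∀ (proteins : List (String × String)), Dom_determine_duplicated_prots proteins → Spec_determine_duplicated_prots proteins (determine_duplicated_prots proteins)

-- ===== LEMMAS AND PROOFS =====

-- A's if/else step is exactly a Python-style `modify` (append on present key, fresh [protid] on absent key)
theorem pv_step_eq (d : PySem.Dict String (List String)) (it : String × String) :
    (if d.contains it.2 then d.modify it.2 ([] : List String) (fun ids => ids ++ [it.1])
     else d.insert it.2 [it.1]) =
    d.modify it.2 ([] : List String) (fun ids => ids ++ [it.1]) := by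
  by_cases h : d.contains it.2 = true
  · simp [h]
  · have hd : d.getD it.2 ([] : List String) = [] :=
      PySem.Dict.getD_of_not_contains d [] (by simpa using h)
    simp [h, PySem.Dict.modify, hd]

-- ===== VERDICT (by name: the statement is the Claim_ definition above) =====
theorem determine_duplicated_prots_spec : Claim_equal_determine_duplicated_prots := by
  intro proteins _
  unfold Spec_determine_duplicated_prots determine_duplicated_prots determine_duplicated_prots_alt
  -- turn A's fold into the pure-modify fold
  have hstep : (fun (d : PySem.Dict String (List String)) (it : String × String) =>
      if d.contains it.2 then d.modify it.2 ([] : List String) (fun ids => ids ++ [it.1])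
      else d.insert it.2 [it.1]) =
      (fun d it => d.modify it.2 ([] : List String) (fun ids => ids ++ [it.1])) :=
    funext fun d => funext fun it => pv_step_eq d it
  rw [hstep]
  set G := proteins.foldl
      (fun (d : PySem.Dict String (List String)) (it : String × String) =>
        d.modify it.2 ([] : List String) (fun ids => ids ++ [it.1]))
      PySem.Dict.empty with hG
  have hnd : G.keys.Nodup := by
    rw [hG]
    exact PySem.Dict.nodup_keys_foldl_modify_key proteins (fun it => it.2)
      ([] : List String) (fun d it ids => ids ++ [it.1]) PySem.Dict.empty (by simp)
  have hkeys : G.keys = PySem.List.dedup (proteins.map (fun it => it.2)) := by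
    rw [hG, PySem.Dict.keys_foldl_modify_key]
    simp [PySem.Set.update_nil_left]
  have hgetD : ∀ c, G.getD c ([] : List String) =
      (proteins.filter (fun it => it.2 == c)).map (fun it => it.1) := by
    intro c
    have hswap : G = (proteins.map (fun it => (it.2, it.1))).foldl
        (fun (d : PySem.Dict String (List String)) (p : String × String) =>
          d.modify p.1 ([] : List String) (fun ids => ids ++ [p.2]))
        PySem.Dict.empty := by
      rw [hG, List.foldl_map]
    rw [hswap, PySem.Dict.getD_foldl_modify_append]
    simp [List.filter_map, Function.comp_def]
  rw [PySem.Dict.items_eq_map_keys G hnd ([] : List String), hkeys]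
  apply List.map_congr_left
  intro p _
  simp [hgetD p]
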